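-- pv_equiv track=rewrite | github.com/sumanpaul01/Python | Lab-4/Ques18.py | duplicate_elements
-- ===== SOURCE A (Python) =====
-- def duplicate_elements(array):
--     duplicates = []
--     frequency = {}
--     for i in array:
--         if array.count(i) > 1 and i not in duplicates:  # array.count(i) returns the frequency of i in the array
--             duplicates.append(i)
--             frequency[i] = array.count(i)
--     return duplicates, frequency
-- ===== SOURCE B (Python) =====
-- def duplicate_elements(array):
--     frequency = {}
--     for i in array:
--         frequency[i] = frequency.get(i, 0) + 1
--     duplicates = [k for k, v in frequency.items() if v > 1]
--     return duplicates, {k: v for k, v in frequency.items() if v > 1}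
-- ===== Notes on version B (the rewrite author's own statement) =====
-- stated objective: faster
-- what changed: One pass builds a complete frequency dict (get+1), then a single pass over its already-unique items filters counts > 1, replacing A's per-element array.count scans and membership test on the duplicates list.
import Mathlib
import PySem

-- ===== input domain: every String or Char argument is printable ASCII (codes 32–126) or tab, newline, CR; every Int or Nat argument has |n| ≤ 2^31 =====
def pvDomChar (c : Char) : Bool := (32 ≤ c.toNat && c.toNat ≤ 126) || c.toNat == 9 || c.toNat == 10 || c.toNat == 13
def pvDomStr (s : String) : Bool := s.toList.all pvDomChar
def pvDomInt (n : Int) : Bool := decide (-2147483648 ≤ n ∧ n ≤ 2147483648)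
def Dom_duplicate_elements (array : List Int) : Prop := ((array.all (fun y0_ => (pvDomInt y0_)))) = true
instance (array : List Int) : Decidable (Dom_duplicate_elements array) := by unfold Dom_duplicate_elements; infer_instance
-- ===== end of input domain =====

-- B builds one full frequency dict in a single pass and filters its unique items, replacing A's per-element array.count scans.


-- ===== PORT A =====
def duplicate_elements (array : List Int) : List Int × (List (Int × Int)) :=
  let st := array.foldl
    (fun (st : List Int × PySem.Dict Int Int) i =>
      if 1 < PySem.List.count array i ∧ i ∉ st.1 then
        (st.1 ++ [i], st.2.insert i ((PySem.List.count array i : Int)))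
      else st)
    ([], PySem.Dict.empty)
  (st.1, st.2.items)

-- ===== PORT B =====
def duplicate_elements_alt (array : List Int) : List Int × (List (Int × Int)) :=
  let frequency := array.foldl
    (fun (d : PySem.Dict Int Int) i => d.insert i (d.getD i 0 + 1)) PySem.Dict.empty
  let duplicates := (frequency.items.filter (fun p => 1 < p.2)).map (·.1)
  let filtered := frequency.items.foldl
    (fun (d : PySem.Dict Int Int) p => if 1 < p.2 then d.insert p.1 p.2 else d) PySem.Dict.empty
  (duplicates, filtered.items)

-- ===== PRECONDITION & SPEC =====
def Spec_duplicate_elements (array : List Int) (out : List Int × (List (Int × Int))) : Prop := out = duplicate_elements_alt array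
instance (array : List Int) (out : List Int × (List (Int × Int))) : Decidable (Spec_duplicate_elements array out) := by unfold Spec_duplicate_elements; infer_instance

-- ===== CLAIM (what is proved, stated in full; the proofs are below) =====
def Claim_equal_duplicate_elements : Prop := ∀ (array : List Int), Dom_duplicate_elements array → Spec_duplicate_elements array (duplicate_elements array)

-- ===== LEMMAS AND PROOFS =====

-- A's duplicates loop, in terms of the list component alone.
def dupStep (array : List Int) (acc : List Int) (i : Int) : List Int :=
  if 1 < PySem.List.count array i ∧ i ∉ acc then acc ++ [i] else acc

-- A's loop invariant: the dict's items mirror the duplicates list.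
lemma a_loop_inv (array : List Int) :
    ∀ (l : List Int) (acc : List Int) (d : PySem.Dict Int Int),
      d.items = acc.map (fun k => (k, (PySem.List.count array k : Int))) →
      (l.foldl (fun (st : List Int × PySem.Dict Int Int) i =>
          if 1 < PySem.List.count array i ∧ i ∉ st.1 then
            (st.1 ++ [i], st.2.insert i ((PySem.List.count array i : Int)))
          else st) (acc, d))
        = (l.foldl (dupStep array) acc,
           PySem.Dict.mk ((l.foldl (dupStep array) acc).map
             (fun k => (k, (PySem.List.count array k : Int))))) := by
  intro l
  induction l with
  | nil =>
    intro acc d h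
    simp only [List.foldl_nil, Prod.mk.injEq]
    exact ⟨trivial, PySem.Dict.ext h⟩
  | cons i l ih =>
    intro acc d h
    simp only [List.foldl_cons]
    by_cases hc : 1 < PySem.List.count array i ∧ i ∉ acc
    · rw [if_pos hc]
      have hkeys : d.keys = acc := by
        rw [PySem.Dict.keys, h, List.map_map]; simp [Function.comp_def]
      have hfresh : d.contains i = false := by
        rw [PySem.Dict.contains_eq_decide_mem_keys, hkeys]
        simpa using hc.2
      have hins : (d.insert i ((PySem.List.count array i : Int))).items
          = d.items ++ [(i, (PySem.List.count array i : Int))] := by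
        simpa using PySem.Dict.items_foldl_insert_fresh [i] id
          (fun k => ((PySem.List.count array k : Int))) d (by simpa using hfresh) (by simp)
      have hstep : dupStep array acc i = acc ++ [i] := by
        unfold dupStep; rw [if_pos hc]
      rw [hstep]
      exact ih (acc ++ [i]) _ (by rw [hins, h]; simp)
    · rw [if_neg hc]
      have hstep : dupStep array acc i = acc := by
        unfold dupStep; rw [if_neg hc]
      rw [hstep]
      exact ih acc d h

-- the duplicates loop computes the ordered dedup filtered by count > 1
lemma dup_loop_filter (array : List Int) :
    ∀ (l : List Int) (s : PySem.Set Int), s.Nodup →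
      l.foldl (dupStep array)
          (s.filter (fun k => decide (1 < PySem.List.count array k)))
        = (PySem.Set.update s l).filter (fun k => decide (1 < PySem.List.count array k)) := by
  intro l
  induction l with
  | nil => intro s _; simp [PySem.Set.update]
  | cons i l ih =>
    intro s hs
    simp only [List.foldl_cons]
    have hstep : dupStep array (s.filter (fun k => decide (1 < PySem.List.count array k))) i
        = (s.add i).filter (fun k => decide (1 < PySem.List.count array k)) := by
      unfold dupStep PySem.Set.add
      by_cases hp : 1 < PySem.List.count array i
      · by_cases hm : i ∈ s
        · rw [if_neg (fun hcon => hcon.2 (List.mem_filter.mpr ⟨hm, decide_eq_true hp⟩)),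
            if_pos (by simpa using hm)]
        · rw [if_pos ⟨hp, fun hin => hm (List.mem_filter.mp hin).1⟩, if_neg (by simpa using hm)]
          rw [List.filter_append]
          have hone : List.filter (fun k => decide (1 < PySem.List.count array k)) [i] = [i] := by
            simp only [List.filter_cons, List.filter_nil]
            rw [if_pos (by simpa using hp)]
          rw [hone]
      · rw [if_neg (fun hcon => hp hcon.1)]
        by_cases hm : i ∈ s
        · rw [if_pos (by simpa using hm)]
        · rw [if_neg (by simpa using hm)]
          rw [List.filter_append]
          have hnone : List.filter (fun k => decide (1 < PySem.List.count array k)) [i] = [] := by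
            simp only [List.filter_cons, List.filter_nil]
            rw [if_neg (by simpa using hp)]
          rw [hnone, List.append_nil]
    have hadd : (s.add i).Nodup := by
      unfold PySem.Set.add
      by_cases hm : i ∈ s
      · rw [if_pos (by simpa using hm)]; exact hs
      · rw [if_neg (by simpa using hm)]
        simp [List.nodup_append, hs]
        intro a ha he
        exact hm (he ▸ ha)
    rw [hstep, ih (s.add i) hadd]
    rfl

-- B's dict-comprehension loop over pairwise-distinct keys keeps exactly the filtered items
lemma filtered_items :
    ∀ (l : List (Int × Int)) (d : PySem.Dict Int Int),
      (∀ p ∈ l, d.contains p.1 = false) → (l.map (·.1)).Nodup →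
      (l.foldl (fun (d : PySem.Dict Int Int) p => if 1 < p.2 then d.insert p.1 p.2 else d) d).items
        = d.items ++ l.filter (fun p => decide (1 < p.2)) := by
  intro l
  induction l with
  | nil => intro d _ _; simp
  | cons p l ih =>
    intro d hfresh hnd
    rw [List.map_cons, List.nodup_cons] at hnd
    obtain ⟨hp1, hnd⟩ := hnd
    simp only [List.foldl_cons, List.filter_cons]
    by_cases hq : (1:Int) < p.2
    · rw [if_pos hq]
      have hins : (d.insert p.1 p.2).items = d.items ++ [p] := by
        simpa using PySem.Dict.items_foldl_insert_fresh [p] (·.1) (·.2) d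
          (by simpa using hfresh p (List.mem_cons_self ..)) (by simp)
      have hfresh' : ∀ r ∈ l, (d.insert p.1 p.2).contains r.1 = false := by
        intro r hr
        have h1 : d.contains r.1 = false := hfresh r (List.mem_cons_of_mem _ hr)
        rw [PySem.Dict.contains_eq_decide_mem_keys, PySem.Dict.keys] at h1 ⊢
        rw [hins]
        simp only [decide_eq_false_iff_not] at h1 ⊢
        simp only [List.map_append, List.mem_append, List.map_cons, List.map_nil,
          List.mem_singleton]
        rintro (h2 | h2)
        · exact h1 h2
        · exact hp1 (by rw [← h2]; exact List.mem_map.mpr ⟨r, hr, rfl⟩)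
      rw [ih (d.insert p.1 p.2) hfresh' hnd, hins]
      simp [hq]
    · rw [if_neg hq, ih d (fun r hr => hfresh r (List.mem_cons_of_mem _ hr)) hnd]
      simp [hq]

theorem duplicate_elements_eq (array : List Int) :
    duplicate_elements array = duplicate_elements_alt array := by
  unfold duplicate_elements duplicate_elements_alt
  rw [PySem.Dict.foldl_insert_getD_add_one_eq_counter]
  have hitems := PySem.Dict.items_counter array
  rw [a_loop_inv array array [] PySem.Dict.empty (by rfl)]
  have hdup := dup_loop_filter array array [] (by simp)
  simp only [List.filter_nil] at hdup
  rw [show PySem.Set.update ([] : PySem.Set Int) array = PySem.Set.ofList array from rfl] at hdup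
  have hfil := filtered_items ((PySem.Dict.counter array).items) PySem.Dict.empty
    (by
      intro p hp
      rw [PySem.Dict.contains_eq_decide_mem_keys]
      simp [PySem.Dict.empty, PySem.Dict.keys])
    (by
      have := PySem.Dict.nodup_keys_counter array
      simpa [PySem.Dict.keys] using this)
  -- align the two filter predicates (Nat count vs cast-to-Int count)
  have hpred : ∀ (l : List Int),
      (l.map (fun k => (k, (List.count k array : Int)))).filter (fun p => decide (1 < p.2))
        = (l.filter (fun k => decide (1 < PySem.List.count array k))).map
            (fun k => (k, (List.count k array : Int))) := by
    intro l
    rw [List.filter_map]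
    congr 1
    apply List.filter_congr
    intro k _
    simp [Function.comp, PySem.List.count]
  rw [Prod.mk.injEq]
  constructor
  · rw [hdup, hitems, List.filter_map, List.map_map]
    rw [show ((fun (x : Int × Int) => x.1) ∘ fun k => (k, (List.count k array : Int)))
        = id from by funext k; rfl]
    rw [List.map_id]
    apply List.filter_congr
    intro k _
    simp [PySem.List.count]
  · rw [hfil, hitems, hpred, hdup]
    simp [PySem.Dict.empty, PySem.List.count]

-- ===== VERDICT (by name: the statement is the Claim_ definition above) =====
theorem duplicate_elements_spec : Claim_equal_duplicate_elements := by
  intro array _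
  unfold Spec_duplicate_elements
  exact duplicate_elements_eq array
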